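-- pv_equiv track=rewrite | github.com/patwadeepak/data-structures-and-algorithms | codeforces/contests-participated/Codeforces Round 1050 (Div. 4)/B.py | solve
-- ===== SOURCE A (Python) =====
-- def solve(n, m, x, y, a, b):
--     crossing = 0
--     for ai in a:
--         if ai < y:
--             crossing += 1
--         else:
--             break
--
--     for bi in b:
--         if bi < x:
--             crossing += 1
--         else:
--             break
--
--     return crossing
-- ===== SOURCE B (Python) =====
-- def _first_ge(vals, limit):
--     # divide and conquer: index of the first element >= limit (len(vals) if none).
--     # Answer is the left half's answer if it found one, else len(left) + right half's answer.
--     if len(vals) <= 1: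
--         return 0 if vals and vals[0] >= limit else len(vals)
--     h = len(vals) // 2
--     left = _first_ge(vals[:h], limit)
--     return left if left < h else h + _first_ge(vals[h:], limit)
--
-- def solve(n, m, x, y, a, b):
--     return _first_ge(a, y) + _first_ge(b, x)
-- ===== Notes on version B (the rewrite author's own statement) =====
-- stated objective: alternative
-- what changed: Replaces A's two left-to-right count-and-break loops by a divide-and-conquer helper that splits each list in half, finds the first index reaching the threshold in the left half and otherwise combines with the right half's answer, summing the two indices.
import Mathlib
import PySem

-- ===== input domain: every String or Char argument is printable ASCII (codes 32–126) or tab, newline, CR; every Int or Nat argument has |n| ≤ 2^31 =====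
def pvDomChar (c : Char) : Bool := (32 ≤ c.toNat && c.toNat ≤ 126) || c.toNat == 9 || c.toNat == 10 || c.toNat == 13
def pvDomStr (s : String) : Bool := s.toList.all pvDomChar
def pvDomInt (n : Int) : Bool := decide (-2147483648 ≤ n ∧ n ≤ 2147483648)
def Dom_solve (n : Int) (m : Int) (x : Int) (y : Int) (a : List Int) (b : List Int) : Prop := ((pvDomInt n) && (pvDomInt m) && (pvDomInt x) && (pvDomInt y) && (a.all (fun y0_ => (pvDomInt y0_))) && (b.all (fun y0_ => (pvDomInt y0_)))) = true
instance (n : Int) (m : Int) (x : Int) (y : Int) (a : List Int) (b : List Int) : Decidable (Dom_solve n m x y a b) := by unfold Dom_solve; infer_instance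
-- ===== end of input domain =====

-- B replaces A's two count-and-break scans by a divide-and-conquer helper (first index
-- reaching the threshold in the left half, else len(left) + right half's answer);
-- objective: alternative (same cost, different algorithm). Both are total.

-- ===== PORT A =====
-- 'for ai in a: if ai < y: crossing += 1 else: break' as structural recursion on the list,
-- threading the counter 'crossing'; the 'else: break' is the non-recursive branch.
def solveLoop (limit : Int) : List Int → Int → Int
  | [], crossing => crossing
  | ai :: rest, crossing => if ai < limit then solveLoop limit rest (crossing + 1) else crossing

def solve (n : Int) (m : Int) (x : Int) (y : Int) (a : List Int) (b : List Int) : Int :=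
  solveLoop x b (solveLoop y a 0)

-- ===== PORT B =====
-- _first_ge: 'vals and vals[0] >= limit' is the nonempty test plus the in-range access
-- vals[0] (= vals.getD 0 0); h = len//2 ≥ 0 so Nat '/' matches Python '//', and the
-- slices vals[:h] / vals[h:] with 0 ≤ h ≤ len are exactly take h / drop h.
def firstGe (vals : List Int) (limit : Int) : Int :=
  if vals.length ≤ 1 then
    if vals ≠ [] ∧ limit ≤ vals.getD 0 0 then 0 else (vals.length : Int)
  else
    let h := vals.length / 2
    let left := firstGe (vals.take h) limit
    if left < (h : Int) then left else (h : Int) + firstGe (vals.drop h) limit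
termination_by vals.length
decreasing_by all_goals simp [List.length_take]; omega

def solve_alt (n : Int) (m : Int) (x : Int) (y : Int) (a : List Int) (b : List Int) : Int :=
  firstGe a y + firstGe b x

-- ===== PRECONDITION & SPEC =====
def Spec_solve (n : Int) (m : Int) (x : Int) (y : Int) (a : List Int) (b : List Int) (out : Int) : Prop := out = solve_alt n m x y a b
instance (n : Int) (m : Int) (x : Int) (y : Int) (a : List Int) (b : List Int) (out : Int) : Decidable (Spec_solve n m x y a b out) := by unfold Spec_solve; infer_instance

-- ===== CLAIM (what is proved, stated in full; the proofs are below) =====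
def Claim_equal_solve : Prop := ∀ (n : Int) (m : Int) (x : Int) (y : Int) (a : List Int) (b : List Int), Dom_solve n m x y a b → Spec_solve n m x y a b (solve n m x y a b)

-- ===== LEMMAS AND PROOFS =====

-- Both programs compute the length of the longest '< t' prefix; this value pivots the proof.
def twLen (arr : List Int) (t : Int) : Nat := (arr.takeWhile (fun v => v < t)).length

theorem twLen_cons_pos (v t : Int) (rest : List Int) (h : v < t) :
    twLen (v :: rest) t = twLen rest t + 1 := by
  simp [twLen, List.takeWhile_cons, h]

theorem twLen_cons_neg (v t : Int) (rest : List Int) (h : ¬ v < t) :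
    twLen (v :: rest) t = 0 := by
  simp [twLen, List.takeWhile_cons, h]

theorem twLen_le (arr : List Int) (t : Int) : twLen arr t ≤ arr.length :=
  (List.takeWhile_sublist _).length_le

theorem solveLoop_eq_twLen (t : Int) (arr : List Int) (c : Int) :
    solveLoop t arr c = c + (twLen arr t : Int) := by
  induction arr generalizing c with
  | nil => simp [solveLoop, twLen]
  | cons v rest ih =>
    by_cases h : v < t
    · rw [solveLoop, if_pos h, ih, twLen_cons_pos v t rest h]; push_cast; ring
    · rw [solveLoop, if_neg h, twLen_cons_neg v t rest h]; simp

theorem twLen_append (l r : List Int) (t : Int) :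
    twLen (l ++ r) t = if twLen l t < l.length then twLen l t else l.length + twLen r t := by
  induction l with
  | nil => simp [twLen]
  | cons v l' ih =>
    by_cases h : v < t
    · rw [List.cons_append, twLen_cons_pos v t _ h, twLen_cons_pos v t _ h, ih]
      by_cases hc : twLen l' t < l'.length <;> simp [hc] <;> omega
    · rw [List.cons_append, twLen_cons_neg v t _ h, twLen_cons_neg v t _ h]
      simp

theorem firstGe_eq_twLen (vals : List Int) (t : Int) :
    firstGe vals t = (twLen vals t : Int) := by
  rw [firstGe]
  by_cases hl : vals.length ≤ 1
  · rw [if_pos hl]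
    match vals with
    | [] => simp [twLen]
    | [v] =>
      by_cases hv : t ≤ v
      · rw [if_pos ⟨by simp, by simpa using hv⟩, twLen_cons_neg v t [] (by omega)]; simp
      · rw [if_neg (by simp; omega), twLen_cons_pos v t [] (by omega)]; simp [twLen]
    | v :: w :: rest => simp at hl
  · rw [if_neg hl]
    have h2 : 2 ≤ vals.length := by omega
    set h := vals.length / 2 with hh
    have hpos : 1 ≤ h := by omega
    have hlt : h < vals.length := by omega
    have ihl := firstGe_eq_twLen (vals.take h) t
    have ihr := firstGe_eq_twLen (vals.drop h) t
    have hsplit := twLen_append (vals.take h) (vals.drop h) t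
    rw [List.take_append_drop] at hsplit
    have hlen : (vals.take h).length = h := by simp [List.length_take]; omega
    have hle := twLen_le (vals.take h) t
    simp only [ihl, ihr]
    by_cases hc : twLen (vals.take h) t < h
    · rw [if_pos (by exact_mod_cast hc)]
      rw [hsplit, if_pos (by omega)]
    · rw [if_neg (by push_cast; omega)]
      rw [hsplit, if_neg (by omega), hlen]
      push_cast; ring
termination_by vals.length
decreasing_by all_goals simp [List.length_take]; omega

-- ===== VERDICT (by name: the statement is the Claim_ definition above) =====
theorem solve_spec : Claim_equal_solve := by
  intro n m x y a b _
  unfold Spec_solve solve solve_alt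
  rw [solveLoop_eq_twLen, solveLoop_eq_twLen, firstGe_eq_twLen, firstGe_eq_twLen]
  ring
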